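-- pv_equiv track=rewrite | github.com/atharva-sardar02/ad-mint-ai | backend/tests/test_prompt_scoring_guide_compliance.py | check_scene_structure
-- ===== SOURCE A (Python) =====
-- def check_scene_structure(prompt: str) -> bool:
--     """Check if prompt follows scene description structure (who/what → action → where/when → style)."""
--     # Basic check: prompt should have multiple parts (subject, action, context, style)
--     words = prompt.lower().split()
--
--     # Check for action words
--     action_words = ["sprinting", "standing", "sitting", "walking", "running", "looking", "holding", "wearing"]
--     has_action = any(word in words for word in action_words)
--
--     # Check for location/context words
--     context_words = ["street", "city", "room", "outdoor", "indoor", "night", "day", "morning", "evening"]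
--     has_context = any(word in words for word in context_words)
--
--     # Check for style words
--     style_words = ["cinematic", "professional", "dramatic", "moody", "vibrant", "soft", "harsh"]
--     has_style = any(word in words for word in style_words)
--
--     return has_action and has_context and has_style
-- ===== SOURCE B (Python) =====
-- ACTION_SET = frozenset(["sprinting", "standing", "sitting", "walking", "running", "looking", "holding", "wearing"])
-- CONTEXT_SET = frozenset(["street", "city", "room", "outdoor", "indoor", "night", "day", "morning", "evening"])
-- STYLE_SET = frozenset(["cinematic", "professional", "dramatic", "moody", "vibrant", "soft", "harsh"])
--
-- def check_scene_structure(prompt: str) -> bool: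
--     has_action = has_context = has_style = False
--     for word in prompt.lower().split():
--         if word in ACTION_SET:
--             has_action = True
--         elif word in CONTEXT_SET:
--             has_context = True
--         elif word in STYLE_SET:
--             has_style = True
--         if has_action and has_context and has_style:
--             return True
--     return False
-- ===== Notes on version B (the rewrite author's own statement) =====
-- stated objective: alternative
-- what changed: Instead of three separate any-scans of the keyword lists over the word list, B makes a single pass over the prompt's words, classifying each word against three keyword sets, with early exit once all three flags are set.
import Mathlib
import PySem

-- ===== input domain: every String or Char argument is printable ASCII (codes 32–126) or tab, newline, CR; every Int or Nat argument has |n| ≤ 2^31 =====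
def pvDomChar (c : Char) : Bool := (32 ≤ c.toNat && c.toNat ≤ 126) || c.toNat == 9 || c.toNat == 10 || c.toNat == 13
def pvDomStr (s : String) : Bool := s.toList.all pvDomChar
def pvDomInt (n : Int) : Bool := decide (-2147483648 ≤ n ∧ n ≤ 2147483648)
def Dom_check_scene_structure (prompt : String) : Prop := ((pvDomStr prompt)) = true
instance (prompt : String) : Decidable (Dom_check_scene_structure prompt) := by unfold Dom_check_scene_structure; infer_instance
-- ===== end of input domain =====

-- B replaces A's three any-scans of the keyword lists over the words with one pass over the
-- words classifying each against three keyword sets, with early exit (objective: alternative).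

-- ===== PORT A =====
def pvActionWords : List String :=
  ["sprinting", "standing", "sitting", "walking", "running", "looking", "holding", "wearing"]
def pvContextWords : List String :=
  ["street", "city", "room", "outdoor", "indoor", "night", "day", "morning", "evening"]
def pvStyleWords : List String :=
  ["cinematic", "professional", "dramatic", "moody", "vibrant", "soft", "harsh"]

def check_scene_structure (prompt : String) : Bool :=
  let words := PySem.Str.split₀ (PySem.Str.lower prompt)
  let has_action := pvActionWords.any (fun word => words.contains word)
  let has_context := pvContextWords.any (fun word => words.contains word)
  let has_style := pvStyleWords.any (fun word => words.contains word)
  has_action && has_context && has_style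

-- ===== PORT B =====
def pvActionSet : PySem.Set String := PySem.Set.ofList pvActionWords
def pvContextSet : PySem.Set String := PySem.Set.ofList pvContextWords
def pvStyleSet : PySem.Set String := PySem.Set.ofList pvStyleWords

-- the single-pass loop of Source B: elif-classification of each word, early return once all flags set
def pvSceneLoop : List String → Bool → Bool → Bool → Bool
  | [], _, _, _ => false
  | w :: ws, a, c, s =>
    let st :=
      if PySem.Set.contains pvActionSet w then (true, c, s)
      else if PySem.Set.contains pvContextSet w then (a, true, s)
      else if PySem.Set.contains pvStyleSet w then (a, c, true)
      else (a, c, s)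
    if st.1 && st.2.1 && st.2.2 then true else pvSceneLoop ws st.1 st.2.1 st.2.2

def check_scene_structure_alt (prompt : String) : Bool :=
  pvSceneLoop (PySem.Str.split₀ (PySem.Str.lower prompt)) false false false

-- ===== PRECONDITION & SPEC =====
def Spec_check_scene_structure (prompt : String) (out : Bool) : Prop := out = check_scene_structure_alt prompt
instance (prompt : String) (out : Bool) : Decidable (Spec_check_scene_structure prompt out) := by unfold Spec_check_scene_structure; infer_instance

-- ===== CLAIM (what is proved, stated in full; the proofs are below) =====
def Claim_equal_check_scene_structure : Prop := ∀ (prompt : String), Dom_check_scene_structure prompt → Spec_check_scene_structure prompt (check_scene_structure prompt)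

-- ===== LEMMAS AND PROOFS =====

-- set membership = list membership for the three literal keyword sets
lemma set_contains_action (w : String) :
    pvActionSet.contains w = pvActionWords.contains w := by
  simp [pvActionSet, pvActionWords, PySem.Set.ofList, PySem.Set.contains]

lemma set_contains_ctx (w : String) :
    pvContextSet.contains w = pvContextWords.contains w := by
  simp [pvContextSet, pvContextWords, PySem.Set.ofList, PySem.Set.contains]

lemma set_contains_sty (w : String) :
    pvStyleSet.contains w = pvStyleWords.contains w := by
  simp [pvStyleSet, pvStyleWords, PySem.Set.ofList, PySem.Set.contains]

-- the three keyword lists are pairwise disjoint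
lemma ctx_not_action (w : String) (h : w ∈ pvContextWords) : w ∉ pvActionWords := by
  simp only [pvContextWords, List.mem_cons, List.not_mem_nil, or_false] at h
  rcases h with rfl|rfl|rfl|rfl|rfl|rfl|rfl|rfl|rfl <;> decide

lemma sty_not_action (w : String) (h : w ∈ pvStyleWords) : w ∉ pvActionWords := by
  simp only [pvStyleWords, List.mem_cons, List.not_mem_nil, or_false] at h
  rcases h with rfl|rfl|rfl|rfl|rfl|rfl|rfl <;> decide

lemma sty_not_ctx (w : String) (h : w ∈ pvStyleWords) : w ∉ pvContextWords := by
  simp only [pvStyleWords, List.mem_cons, List.not_mem_nil, or_false] at h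
  rcases h with rfl|rfl|rfl|rfl|rfl|rfl|rfl <;> decide

-- loop invariant: whenever the flags are not yet all true (the early return guarantees this),
-- the one-pass loop computes the conjunction of the three flag closures
lemma pvSceneLoop_eq (ws : List String) : ∀ a c s : Bool, (a && c && s) = false →
    pvSceneLoop ws a c s =
      ((a || ws.any (fun w => pvActionWords.contains w)) &&
       (c || ws.any (fun w => pvContextWords.contains w)) &&
       (s || ws.any (fun w => pvStyleWords.contains w))) := by
  induction ws with
  | nil =>
    intro a c s h
    cases a <;> cases c <;> cases s <;> simp_all [pvSceneLoop]
  | cons w ws ih =>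
    intro a c s h
    simp only [pvSceneLoop, set_contains_action, set_contains_ctx, set_contains_sty]
    cases hA : pvActionWords.contains w <;>
      cases hC : pvContextWords.contains w <;>
        cases hS : pvStyleWords.contains w
    · -- in none of the three lists
      have hA' : w ∉ pvActionWords := by simpa using hA
      have hC' : w ∉ pvContextWords := by simpa using hC
      have hS' : w ∉ pvStyleWords := by simpa using hS
      simp only [Bool.false_eq_true, if_false]
      rw [if_neg (by simp [h]), ih a c s h]
      simp [List.any_cons, hA', hC', hS']
    · -- style word only
      have hA' : w ∉ pvActionWords := by simpa using hA
      have hC' : w ∉ pvContextWords := by simpa using hC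
      have hS' : w ∈ pvStyleWords := by simpa using hS
      simp only [Bool.false_eq_true, if_false, if_true]
      by_cases hall : (a && c && true) = true
      · rw [if_pos hall]
        have hac := (Bool.and_eq_true a c).mp (by simpa using hall)
        simp [List.any_cons, hS', hac.1, hac.2]
      · rw [if_neg hall, ih a c true (by simpa using hall)]
        cases a <;> cases c <;> cases s <;> simp_all [List.any_cons]
    · -- context word only
      have hA' : w ∉ pvActionWords := by simpa using hA
      have hC' : w ∈ pvContextWords := by simpa using hC
      have hS' : w ∉ pvStyleWords := by simpa using hS
      simp only [Bool.false_eq_true, if_false, if_true]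
      by_cases hall : (a && true && s) = true
      · rw [if_pos hall]
        have has := (Bool.and_eq_true a s).mp (by simpa using hall)
        simp [List.any_cons, hC', has.1, has.2]
      · rw [if_neg hall, ih a true s (by simpa using hall)]
        cases a <;> cases c <;> cases s <;> simp_all [List.any_cons]
    · -- impossible: the context and style lists are disjoint
      exact absurd (by simpa using hC) (sty_not_ctx w (by simpa using hS))
    · -- action word only
      have hA' : w ∈ pvActionWords := by simpa using hA
      have hC' : w ∉ pvContextWords := by simpa using hC
      have hS' : w ∉ pvStyleWords := by simpa using hS
      simp only [if_true]
      by_cases hall : (true && c && s) = true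
      · rw [if_pos hall]
        have hcs := (Bool.and_eq_true c s).mp (by simpa using hall)
        simp [List.any_cons, hA', hcs.1, hcs.2]
      · rw [if_neg hall, ih true c s (by simpa using hall)]
        cases a <;> cases c <;> cases s <;> simp_all [List.any_cons]
    · exact absurd (by simpa using hA) (sty_not_action w (by simpa using hS))
    · exact absurd (by simpa using hA) (ctx_not_action w (by simpa using hC))
    · exact absurd (by simpa using hA) (ctx_not_action w (by simpa using hC))

-- membership-direction swap: any kw-scan over the words = any word-scan over the keywords
lemma any_swap (L ws : List String) :
    (L.any fun kw => ws.contains kw) = (ws.any fun w => L.contains w) := by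
  rw [Bool.eq_iff_iff]
  simp only [List.any_eq_true, List.contains_iff_mem]
  exact ⟨fun ⟨kw, h1, h2⟩ => ⟨kw, h2, h1⟩, fun ⟨w, h1, h2⟩ => ⟨w, h2, h1⟩⟩

-- ===== VERDICT (by name: the statement is the Claim_ definition above) =====
theorem check_scene_structure_spec : Claim_equal_check_scene_structure := by
  intro prompt _
  unfold Spec_check_scene_structure check_scene_structure check_scene_structure_alt
  rw [pvSceneLoop_eq _ false false false rfl]
  simp only [Bool.false_or]
  rw [any_swap pvActionWords, any_swap pvContextWords, any_swap pvStyleWords]
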